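-- pv_equiv track=rewrite | github.com/fevitta/SqlMentor | src/sqlmentor/parser.py | is_normalized_sql
-- ===== SOURCE A (Python) =====
-- SUPPORTED_DIALECTS = ("oracle", "postgresql", "mariadb")
--
-- def _validate_dialect(dialect: str) -> str:
--     """Valida e normaliza o nome do dialeto.
--
--     Raises:
--         ValueError: se o dialeto não é suportado.
--     """
--     dialect = dialect.lower()
--     if dialect not in SUPPORTED_DIALECTS:
--         raise ValueError(f"Dialeto '{dialect}' nao suportado. Use: {', '.join(SUPPORTED_DIALECTS)}")
--     return dialect
--
-- def is_normalized_sql(sql_text: str, dialect: str = "oracle") -> bool: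
--     """
--     Detecta se o SQL parece ser normalizado (literais substituidos por '?').
--
--     Heuristica: conta '?' fora de strings. Se houver 2+ ocorrencias, e normalizado.
--     Funciona para todos os dialetos — ferramentas de monitoramento (Datadog, OEM,
--     pg_stat_statements) usam '?' como placeholder universal.
--
--     Args:
--         sql_text: SQL a ser verificado.
--         dialect: Dialeto do SQL (oracle, postgresql, mariadb). Reservado para
--                  heuristicas futuras; por ora a logica e a mesma para todos.
--
--     Returns:
--         True se o SQL parece normalizado.
--     """
--     _validate_dialect(dialect)
--     count = 0
--     in_single_quote = False
--     in_double_quote = False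
--
--     for ch in sql_text:
--         if ch == "'" and not in_double_quote:
--             in_single_quote = not in_single_quote
--             continue
--         if ch == '"' and not in_single_quote:
--             in_double_quote = not in_double_quote
--             continue
--         if in_single_quote or in_double_quote:
--             continue
--         if ch == "?":
--             count += 1
--             if count >= 2:
--                 return True
--
--     return False
-- ===== SOURCE B (Python) =====
-- SUPPORTED_DIALECTS = ("oracle", "postgresql", "mariadb")
--
--
-- def _validate_dialect(dialect: str) -> str:
--     dialect = dialect.lower()
--     if dialect not in SUPPORTED_DIALECTS:
--         raise ValueError(f"Dialeto '{dialect}' nao suportado. Use: {', '.join(SUPPORTED_DIALECTS)}")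
--     return dialect
--
--
-- def is_normalized_sql(sql_text: str, dialect: str = "oracle") -> bool:
--     """Count '?' outside quoted regions by skipping each quoted region whole:
--     a shared iterator is advanced past the matching close quote by an inner
--     loop, so no quote-state booleans are needed."""
--     _validate_dialect(dialect)
--     count = 0
--     it = iter(sql_text)
--     for ch in it:
--         if ch == "'" or ch == '"':
--             for c2 in it:
--                 if c2 == ch:
--                     break
--         elif ch == "?":
--             count += 1
--     return count >= 2
-- ===== Notes on version B (the rewrite author's own statement) =====
-- stated objective: alternative
-- what changed: Replaces A's per-character loop with quote-state booleans and early return by an iterator-consuming decomposition: each quoted region is skipped whole by an inner loop over the shared iterator, then the final placeholder count is compared to 2.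
import Mathlib
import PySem

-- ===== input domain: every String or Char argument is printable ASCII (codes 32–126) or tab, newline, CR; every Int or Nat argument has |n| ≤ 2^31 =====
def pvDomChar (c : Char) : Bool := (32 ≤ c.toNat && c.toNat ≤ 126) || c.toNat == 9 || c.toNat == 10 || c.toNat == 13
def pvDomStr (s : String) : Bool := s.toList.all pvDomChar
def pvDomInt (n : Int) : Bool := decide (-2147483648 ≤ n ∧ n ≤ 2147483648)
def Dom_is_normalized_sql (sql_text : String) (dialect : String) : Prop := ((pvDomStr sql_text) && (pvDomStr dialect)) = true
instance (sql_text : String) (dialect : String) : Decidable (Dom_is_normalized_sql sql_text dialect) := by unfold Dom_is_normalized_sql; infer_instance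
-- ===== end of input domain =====

-- B replaces A's quote-state booleans by skipping each quoted region whole with an
-- inner loop over a shared iterator (alternative decomposition; return value only).

-- ===== PORT A =====
-- the dialect check shared by both ports: dialect.lower() in SUPPORTED_DIALECTS
def pvDialectOk (dialect : String) : Bool :=
  let d := PySem.Str.lower dialect
  d == "oracle" || d == "postgresql" || d == "mariadb"

-- A's character loop: state (count, in_single_quote, in_double_quote), early return on count ≥ 2
def pvALoop : List Char → Int → Bool → Bool → Bool
  | [], _, _, _ => false
  | ch :: rest, count, insq, indq =>
    if ch = '\'' ∧ indq = false then pvALoop rest count (!insq) indq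
    else if ch = '"' ∧ insq = false then pvALoop rest count insq (!indq)
    else if insq || indq then pvALoop rest count insq indq
    else if ch = '?' then
      if count + 1 ≥ 2 then true else pvALoop rest (count + 1) insq indq
    else pvALoop rest count insq indq

def is_normalized_sql (sql_text : String) (dialect : String) : Bool :=
  if pvDialectOk dialect then pvALoop sql_text.toList 0 false false
  else false  -- Python raises ValueError here; excluded by Pre_

-- ===== PORT B =====
-- inner 'for c2 in it: if c2 == ch: break' — consumes through the matching quote
def pvSkipTo (q : Char) : List Char → List Char
  | [] => []
  | c :: cs => if c = q then cs else pvSkipTo q cs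

theorem pvSkipTo_length_le (q : Char) (l : List Char) : (pvSkipTo q l).length ≤ l.length := by
  induction l with
  | nil => simp [pvSkipTo]
  | cons c cs ih => simp only [pvSkipTo]; split <;> simp <;> omega

-- outer 'for ch in it' with the quoted region skipped whole
def pvBLoop : List Char → Int → Int
  | [], count => count
  | ch :: rest, count =>
    if ch = '\'' ∨ ch = '"' then pvBLoop (pvSkipTo ch rest) count
    else if ch = '?' then pvBLoop rest (count + 1)
    else pvBLoop rest count
termination_by l _ => l.length
decreasing_by
  · exact Nat.lt_succ_of_le (pvSkipTo_length_le _ _)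
  · simp
  · simp

def is_normalized_sql_alt (sql_text : String) (dialect : String) : Bool :=
  if pvDialectOk dialect then pvBLoop sql_text.toList 0 ≥ 2
  else false  -- Python raises ValueError here; excluded by Pre_

-- ===== PRECONDITION & SPEC =====
-- Pre_ excludes exactly the inputs on which A raises ValueError (unsupported dialect).
def Pre_is_normalized_sql (sql_text : String) (dialect : String) : Prop :=
  PySem.Str.lower dialect = "oracle" ∨ PySem.Str.lower dialect = "postgresql" ∨ PySem.Str.lower dialect = "mariadb"
instance (sql_text : String) (dialect : String) : Decidable (Pre_is_normalized_sql sql_text dialect) := by unfold Pre_is_normalized_sql; infer_instance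

def pvWitness_is_normalized_sql : String × String := ("select a from t where x = ? and y = ?", "Oracle")

def Spec_is_normalized_sql (sql_text : String) (dialect : String) (out : Bool) : Prop := out = is_normalized_sql_alt sql_text dialect
instance (sql_text : String) (dialect : String) (out : Bool) : Decidable (Spec_is_normalized_sql sql_text dialect out) := by unfold Spec_is_normalized_sql; infer_instance

-- ===== CLAIM (what is proved, stated in full; the proofs are below) =====
def Claim_equal_is_normalized_sql : Prop := ∀ (sql_text : String) (dialect : String), Dom_is_normalized_sql sql_text dialect → Pre_is_normalized_sql sql_text dialect → Spec_is_normalized_sql sql_text dialect (is_normalized_sql sql_text dialect)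

-- ===== LEMMAS AND PROOFS =====

-- reference count of '?' outside quotes, A's toggle semantics without the early return
def pvCnt : List Char → Bool → Bool → Nat
  | [], _, _ => 0
  | ch :: rest, insq, indq =>
    if ch = '\'' ∧ indq = false then pvCnt rest (!insq) indq
    else if ch = '"' ∧ insq = false then pvCnt rest insq (!indq)
    else if insq || indq then pvCnt rest insq indq
    else if ch = '?' then 1 + pvCnt rest insq indq
    else pvCnt rest insq indq

theorem pvALoop_eq_cnt (l : List Char) : ∀ (c : Int) (insq indq : Bool), c < 2 →
    pvALoop l c insq indq = decide (c + (pvCnt l insq indq : Int) ≥ 2) := by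
  induction l with
  | nil => intro c insq indq hc; simp [pvALoop, pvCnt]; omega
  | cons ch rest ih =>
    intro c insq indq hc
    simp only [pvALoop, pvCnt]
    split
    · exact ih c (!insq) indq hc
    · split
      · exact ih c insq (!indq) hc
      · split
        · exact ih c insq indq hc
        · split
          · split
            · have : (2:Int) ≤ c + (1 + (pvCnt rest insq indq : Int)) := by
                have : (0:Int) ≤ (pvCnt rest insq indq : Int) := Int.natCast_nonneg _
                omega
              simp [this]
            · rw [ih (c+1) insq indq (by omega)]
              congr 1; push_cast; ring_nf
          · exact ih c insq indq hc

theorem pvCnt_single (l : List Char) : pvCnt l true false = pvCnt (pvSkipTo '\'' l) false false := by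
  induction l with
  | nil => simp [pvCnt, pvSkipTo]
  | cons ch rest ih =>
    simp only [pvCnt, pvSkipTo]
    by_cases h : ch = '\''
    · simp [h]
    · simp [h, ih]

theorem pvCnt_double (l : List Char) : pvCnt l false true = pvCnt (pvSkipTo '"' l) false false := by
  induction l with
  | nil => simp [pvCnt, pvSkipTo]
  | cons ch rest ih =>
    simp only [pvCnt, pvSkipTo]
    by_cases h : ch = '"'
    · simp [h, pvCnt]
    · by_cases h' : ch = '\''
      · simp [h', pvCnt] at *; simpa [h] using ih
      · simp [h, h', ih]

theorem pvBLoop_eq_cnt (l : List Char) (c : Int) :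
    pvBLoop l c = c + (pvCnt l false false : Int) := by
  induction l, c using pvBLoop.induct with
  | case1 c => simp [pvBLoop, pvCnt]
  | case2 ch rest c h ih =>
    rw [pvBLoop]
    simp only [if_pos h]
    rcases h with h | h
    · subst h
      rw [ih]
      simp [pvCnt, pvCnt_single]
    · subst h
      rw [ih]
      simp [pvCnt, pvCnt_double]
  | case3 rest c h1 ih =>
    rw [pvBLoop]
    simp only [if_neg h1, if_pos rfl, ih]
    simp [pvCnt]
    push_cast; ring
  | case4 ch rest c h1 h2 ih =>
    rw [pvBLoop]
    simp only [if_neg h1, if_neg h2, ih]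
    push_neg at h1
    simp [pvCnt, h1.1, h1.2, h2]

-- ===== VERDICT (by name: the statement is the Claim_ definition above) =====
theorem is_normalized_sql_spec : Claim_equal_is_normalized_sql := by
  intro sql_text dialect _ _
  unfold Spec_is_normalized_sql is_normalized_sql is_normalized_sql_alt
  by_cases h : pvDialectOk dialect = true
  · simp only [if_pos h]
    rw [pvALoop_eq_cnt _ 0 false false (by omega), pvBLoop_eq_cnt]
  · simp [h]
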